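-- pv_equiv track=rewrite | github.com/tomnattle/chain-explosion-model | ripple_computer_lab/ripple_sqrt2_20digits.py | interference_seed
-- ===== SOURCE A (Python) =====
-- def interference_seed(mu_num=15495, mu_den=10000, eta_num=8, eta_den=100, steps=120):
--     """
--     Returns a fixed-point seed y ~= sqrt(2)*S, without using sqrt.
--     Model:
--         x_{k+1} = x_k + damp * (2 - x_k^2) / (2*x_k + rho)
--     where damp=(1-eta), rho from mu and density mapping.
--     """
--     # Keep everything in fixed-point to avoid huge rational growth.
--     seed_scale = 10 ** 8
--     x = seed_scale  # 1.0
--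
--     damp_num = eta_den - eta_num  # 0.92 when eta=0.08
--     damp_den = eta_den
--
--     rho_num, rho_den = 235, 100
--     # coupling ~= mu * rho
--     coupling_scaled = (mu_num * rho_num * seed_scale) // (mu_den * rho_den)
--
--     for _ in range(steps):
--         # residual_scaled ~= (2 - (x/S)^2) * S
--         residual_scaled = 2 * seed_scale - ((x * x) // seed_scale)
--
--         # denominator_scaled ~= (2*x + coupling)
--         denominator_scaled = 2 * x + coupling_scaled
--         if denominator_scaled <= 0:
--             denominator_scaled = seed_scale
--
--         # delta_scaled ~= damp * residual / denominator, still in S scale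
--         delta_scaled = (
--             damp_num * residual_scaled * seed_scale
--         ) // (damp_den * denominator_scaled)
--
--         x = x + delta_scaled
--
--     return x, seed_scale
-- ===== SOURCE B (Python) =====
-- def interference_seed(mu_num=15495, mu_den=10000, eta_num=8, eta_den=100, steps=120):
--     """Cycle detection: remember the first index of every value seen; when a value
--     repeats, fast-forward the remaining steps through the cycle arithmetically
--     instead of iterating them one by one."""
--     seed_scale = 10 ** 8
--     damp_num = eta_den - eta_num
--     damp_den = eta_den
--     coupling_scaled = (mu_num * 235 * seed_scale) // (mu_den * 100)
--
--     traj = [seed_scale]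
--     seen = {seed_scale: 0}
--     x = seed_scale
--     for k in range(1, steps + 1):
--         residual_scaled = 2 * seed_scale - ((x * x) // seed_scale)
--         denominator_scaled = 2 * x + coupling_scaled
--         if denominator_scaled <= 0:
--             denominator_scaled = seed_scale
--         x = x + (damp_num * residual_scaled * seed_scale) // (damp_den * denominator_scaled)
--         if x in seen:
--             j = seen[x]
--             idx = j + (steps - j) % (k - j)
--             return traj[idx], seed_scale
--         seen[x] = k
--         traj.append(x)
--     return x, seed_scale
-- ===== Notes on version B (the rewrite author's own statement) =====
-- stated objective: faster
-- what changed: B detects when the iteration's value repeats (a dict of first-seen values plus the trajectory list) and fast-forwards the remaining steps through the cycle with modular arithmetic, instead of executing all `steps` updates.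
import Mathlib
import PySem

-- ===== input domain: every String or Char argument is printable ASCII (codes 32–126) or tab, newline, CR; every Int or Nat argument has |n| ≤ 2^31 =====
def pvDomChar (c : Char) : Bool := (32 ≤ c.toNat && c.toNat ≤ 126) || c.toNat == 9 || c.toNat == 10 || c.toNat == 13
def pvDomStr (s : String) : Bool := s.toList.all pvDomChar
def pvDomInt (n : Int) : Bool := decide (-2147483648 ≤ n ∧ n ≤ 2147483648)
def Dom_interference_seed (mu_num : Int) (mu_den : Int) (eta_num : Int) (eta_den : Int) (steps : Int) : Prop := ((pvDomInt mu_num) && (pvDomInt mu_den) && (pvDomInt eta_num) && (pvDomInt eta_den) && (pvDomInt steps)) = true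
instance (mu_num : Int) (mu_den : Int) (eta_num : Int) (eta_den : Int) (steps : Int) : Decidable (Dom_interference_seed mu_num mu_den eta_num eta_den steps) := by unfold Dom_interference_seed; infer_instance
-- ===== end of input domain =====

-- B replaces A's fixed-count iteration by cycle detection: it remembers the first
-- index of every value and fast-forwards the remaining steps through the cycle.

-- ===== PORT A =====
def interference_seed (mu_num : Int) (mu_den : Int) (eta_num : Int) (eta_den : Int) (steps : Int) : List Int :=
  let seed_scale : Int := 10 ^ 8
  let damp_num : Int := eta_den - eta_num
  let damp_den : Int := eta_den
  let coupling_scaled : Int := PySem.Int.floordiv (mu_num * 235 * seed_scale) (mu_den * 100)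
  let x : Int := (PySem.List.pyRange 0 steps 1).foldl (fun x _ =>
    let residual_scaled := 2 * seed_scale - PySem.Int.floordiv (x * x) seed_scale
    let denominator_scaled := 2 * x + coupling_scaled
    let denominator_scaled := if denominator_scaled ≤ 0 then seed_scale else denominator_scaled
    let delta_scaled := PySem.Int.floordiv (damp_num * residual_scaled * seed_scale)
      (damp_den * denominator_scaled)
    x + delta_scaled) seed_scale
  [x, seed_scale]

-- ===== PORT B =====
-- B's loop: fuel = remaining iterations of `for k in range(1, steps+1)`; `traj` is the
-- trajectory list, `seen` maps a value to its first index k (= traj.length at insertion).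
-- `traj[idx]` is always in range (proved below); the port reads it via pyGet?/getD.
def pvLoopB (coupling_scaled damp_num damp_den seed_scale steps : Int) :
    Nat → Int → List Int → PySem.Dict Int Int → Int
  | 0, x, _, _ => x
  | fuel + 1, x, traj, seen =>
    let residual_scaled := 2 * seed_scale - PySem.Int.floordiv (x * x) seed_scale
    let denominator_scaled := 2 * x + coupling_scaled
    let denominator_scaled := if denominator_scaled ≤ 0 then seed_scale else denominator_scaled
    let y := x + PySem.Int.floordiv (damp_num * residual_scaled * seed_scale)
      (damp_den * denominator_scaled)
    match seen.get? y with
    | some j =>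
      let idx := j + PySem.Int.mod (steps - j) ((traj.length : Int) - j)
      (PySem.List.pyGet? traj idx).getD 0
    | none => pvLoopB coupling_scaled damp_num damp_den seed_scale steps fuel y
        (traj ++ [y]) (seen.insert y (traj.length : Int))

def interference_seed_alt (mu_num : Int) (mu_den : Int) (eta_num : Int) (eta_den : Int) (steps : Int) : List Int :=
  let seed_scale : Int := 10 ^ 8
  let damp_num : Int := eta_den - eta_num
  let damp_den : Int := eta_den
  let coupling_scaled : Int := PySem.Int.floordiv (mu_num * 235 * seed_scale) (mu_den * 100)
  let x : Int := pvLoopB coupling_scaled damp_num damp_den seed_scale steps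
    steps.toNat seed_scale [seed_scale] (PySem.Dict.empty.insert seed_scale 0)
  [x, seed_scale]

-- ===== PRECONDITION & SPEC =====
-- Pre_ excludes exactly the ZeroDivisionError cases of A: mu_den = 0 (coupling
-- division), and eta_den = 0 when the loop runs at least once.
def Pre_interference_seed (mu_num : Int) (mu_den : Int) (eta_num : Int) (eta_den : Int) (steps : Int) : Prop :=
  mu_den ≠ 0 ∧ (eta_den ≠ 0 ∨ steps ≤ 0)
instance (mu_num : Int) (mu_den : Int) (eta_num : Int) (eta_den : Int) (steps : Int) : Decidable (Pre_interference_seed mu_num mu_den eta_num eta_den steps) := by unfold Pre_interference_seed; infer_instance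
def pvWitness_interference_seed : Int × Int × Int × Int × Int := (15495, 10000, 8, 100, 5)
def Spec_interference_seed (mu_num : Int) (mu_den : Int) (eta_num : Int) (eta_den : Int) (steps : Int) (out : List Int) : Prop := out = interference_seed_alt mu_num mu_den eta_num eta_den steps
instance (mu_num : Int) (mu_den : Int) (eta_num : Int) (eta_den : Int) (steps : Int) (out : List Int) : Decidable (Spec_interference_seed mu_num mu_den eta_num eta_den steps out) := by unfold Spec_interference_seed; infer_instance

-- ===== CLAIM =====
def Claim_equal_interference_seed : Prop := ∀ (mu_num : Int) (mu_den : Int) (eta_num : Int) (eta_den : Int) (steps : Int), Dom_interference_seed mu_num mu_den eta_num eta_den steps → Pre_interference_seed mu_num mu_den eta_num eta_den steps → Spec_interference_seed mu_num mu_den eta_num eta_den steps (interference_seed mu_num mu_den eta_num eta_den steps)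

-- ===== LEMMAS AND PROOFS =====

-- the one update step both programs use
def pvStep (c dn dd s : Int) (x : Int) : Int :=
  let residual_scaled := 2 * s - PySem.Int.floordiv (x * x) s
  let denominator_scaled := 2 * x + c
  let denominator_scaled := if denominator_scaled ≤ 0 then s else denominator_scaled
  x + PySem.Int.floordiv (dn * residual_scaled * s) (dd * denominator_scaled)

-- n-fold iteration (what A's foldl does, since it ignores the loop variable)
def pvIterA (f : Int → Int) : Nat → Int → Int
  | 0, x => x
  | n + 1, x => pvIterA f n (f x)

theorem foldl_const_eq_iterA (f : Int → Int) (l : List Int) (x : Int) :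
    l.foldl (fun a _ => f a) x = pvIterA f l.length x := by
  induction l generalizing x with
  | nil => rfl
  | cons h t ih => simp [List.foldl, pvIterA, ih]

theorem iterA_add (f : Int → Int) (a b : Nat) (x : Int) :
    pvIterA f (a + b) x = pvIterA f a (pvIterA f b x) := by
  induction b generalizing x with
  | zero => rfl
  | succ b ih => simpa [pvIterA] using ih (f x)

theorem iterA_succ' (f : Int → Int) (k : Nat) (x : Int) :
    pvIterA f (k + 1) x = f (pvIterA f k x) := by
  have h := iterA_add f 1 k x
  simpa [Nat.add_comm, pvIterA] using h

-- once the orbit repeats with period p after index j, indices can be reduced mod p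
theorem iterA_period (f : Int → Int) (x0 : Int) (j p : Nat) (hp : 0 < p)
    (h : pvIterA f (j + p) x0 = pvIterA f j x0) :
    ∀ m, pvIterA f (j + m) x0 = pvIterA f (j + m % p) x0 := by
  intro m
  induction m using Nat.strong_induction_on with
  | _ m ih =>
    by_cases hm : m < p
    · rw [Nat.mod_eq_of_lt hm]
    · push Not at hm
      have h1 : j + m = (m - p) + (j + p) := by omega
      have h2 : pvIterA f (j + m) x0 = pvIterA f (j + (m - p)) x0 := by
        rw [h1, iterA_add, h, ← iterA_add, Nat.add_comm]
      rw [h2, ih (m - p) (by omega), Nat.mod_eq_sub_mod hm]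

-- main loop invariant: pvLoopB computes the (steps.toNat)-th iterate
theorem loopB_correct (c dn dd s steps x0 : Int) :
    ∀ (fuel k : Nat) (x : Int) (traj : List Int) (seen : PySem.Dict Int Int),
    fuel + k = steps.toNat →
    traj.length = k + 1 →
    (∀ i : Nat, i < k + 1 → traj[i]? = some (pvIterA (pvStep c dn dd s) i x0)) →
    x = pvIterA (pvStep c dn dd s) k x0 →
    (∀ v j, seen.get? v = some j →
      ∃ jn : Nat, j = (jn : Int) ∧ jn ≤ k ∧ pvIterA (pvStep c dn dd s) jn x0 = v) →
    pvLoopB c dn dd s steps fuel x traj seen = pvIterA (pvStep c dn dd s) steps.toNat x0 := by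
  intro fuel
  induction fuel with
  | zero =>
    intro k x traj seen hfk _ _ hx _
    have : k = steps.toNat := by omega
    simpa [pvLoopB, this] using hx
  | succ fuel ih =>
    intro k x traj seen hfk hlen htraj hx hseen
    set f := pvStep c dn dd s with hf
    have hy : pvStep c dn dd s x = pvIterA f (k + 1) x0 := by
      rw [iterA_succ', hx]
    show (match seen.get? (pvStep c dn dd s x) with
      | some j =>
        let idx := j + PySem.Int.mod (steps - j) ((traj.length : Int) - j)
        (PySem.List.pyGet? traj idx).getD 0
      | none => pvLoopB c dn dd s steps fuel (pvStep c dn dd s x)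
          (traj ++ [pvStep c dn dd s x]) (seen.insert (pvStep c dn dd s x) (traj.length : Int)))
      = pvIterA f steps.toNat x0
    cases hget : seen.get? (pvStep c dn dd s x) with
    | some j =>
      obtain ⟨jn, rfl, hjk, hjv⟩ := hseen _ _ hget
      -- period p of the repeat
      set n := steps.toNat with hn
      have hkn : k + 1 ≤ n := by omega
      set p : Nat := k + 1 - jn with hpdef
      have hp : 0 < p := by omega
      have hper : pvIterA f (jn + p) x0 = pvIterA f jn x0 := by
        have : jn + p = k + 1 := by omega
        rw [this, ← hy, hjv]
      set m : Nat := n - jn with hmdef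
      -- the integer index computed by the port is the Nat index jn + m % p
      have hsteps : steps = (n : Int) := by
        have : 0 < n := by omega
        omega
      have hdivpos : (0:Int) < (traj.length : Int) - (jn : Int) := by
        rw [hlen]; push_cast; omega
      have hmod : PySem.Int.mod (steps - (jn : Int)) ((traj.length : Int) - (jn : Int))
          = ((m % p : Nat) : Int) := by
        rw [PySem.Int.mod_eq_emod_of_pos hdivpos, hlen, hsteps]
        have h1 : (n : Int) - (jn : Int) = ((m : Nat) : Int) := by push_cast; omega
        have h2 : ((k + 1 : Nat) : Int) - (jn : Int) = ((p : Nat) : Int) := by push_cast; omega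
        rw [h1, h2]
        exact (Int.natCast_mod m p).symm
      have hidxlt : jn + m % p < traj.length := by
        have := Nat.mod_lt m hp
        omega
      have hidx : (jn : Int) + PySem.Int.mod (steps - (jn : Int)) ((traj.length : Int) - (jn : Int))
          = ((jn + m % p : Nat) : Int) := by
        rw [hmod]; push_cast; ring
      simp only [hidx]
      rw [PySem.List.pyGet?_natCast, htraj _ (by omega)]
      simp only [Option.getD_some]
      have := iterA_period f x0 jn p hp hper m
      rw [← this]
      congr 1
      omega
    | none =>
      refine ih (k + 1) (pvStep c dn dd s x) (traj ++ [pvStep c dn dd s x]) _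
        (by omega) (by simp [hlen]) ?_ hy ?_
      · intro i hi
        by_cases hik : i < k + 1
        · rw [List.getElem?_append_left (by omega), htraj _ hik]
        · have : i = k + 1 := by omega
          subst this
          rw [List.getElem?_append_right (by omega)]
          simp [hlen, hy]
      · intro v j hvj
        rw [PySem.Dict.get?_insert] at hvj
        split at hvj
        · rename_i hveq
          subst hveq
          have hj : j = ((k + 1 : Nat) : Int) := by
            rw [Option.some.injEq] at hvj
            rw [← hvj, hlen]
          exact ⟨k + 1, hj, le_refl _, hy.symm⟩
        · obtain ⟨jn, rfl, hjk, hjv⟩ := hseen _ _ hvj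
          exact ⟨jn, rfl, by omega, hjv⟩

-- ===== VERDICT =====
theorem interference_seed_spec : Claim_equal_interference_seed := by
  intro mu_num mu_den eta_num eta_den steps _ _
  unfold Spec_interference_seed interference_seed interference_seed_alt
  simp only []
  set s : Int := 10 ^ 8
  set dn : Int := eta_den - eta_num
  set c : Int := PySem.Int.floordiv (mu_num * 235 * s) (mu_den * 100)
  rw [show (fun (x : Int) (_ : Int) =>
      let residual_scaled := 2 * s - PySem.Int.floordiv (x * x) s
      let denominator_scaled := 2 * x + c
      let denominator_scaled := if denominator_scaled ≤ 0 then s else denominator_scaled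
      let delta_scaled := PySem.Int.floordiv (dn * residual_scaled * s)
        (eta_den * denominator_scaled)
      x + delta_scaled) = (fun (a : Int) (_ : Int) => pvStep c dn eta_den s a) from rfl]
  rw [foldl_const_eq_iterA, PySem.List.length_pyRange_one,
    show steps - 0 = steps from by ring]
  rw [loopB_correct c dn eta_den s steps s steps.toNat 0 s [s]
    (PySem.Dict.empty.insert s 0) (by omega) rfl ?_ rfl ?_]
  · intro i hi
    have : i = 0 := by omega
    subst this
    rfl
  · intro v j hvj
    rw [PySem.Dict.get?_insert] at hvj
    split at hvj
    · rename_i hveq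
      exact ⟨0, by simpa using hvj.symm, le_refl _, by simp [pvIterA, hveq]⟩
    · simp [PySem.Dict.get?_empty] at hvj
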